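-- pv_equiv track=rewrite | github.com/Anselmoo/mcp-zen-of-languages | src/mcp_zen_of_languages/languages/ansible/detectors.py | _line_of_token
-- ===== SOURCE A (Python) =====
-- def _line_of_token(code: str, token: str, default: int = 1, start_line: int = 1) -> int:
--     lines = code.splitlines()
--     for idx in range(max(start_line, 1) - 1, len(lines)):
--         if token in lines[idx]:
--             return idx + 1
--     # Fallback for callers using an offset when the token appears earlier in the file.
--     for idx, line in enumerate(lines, start=1):
--         if token in line:
--             return idx
--     return default
-- ===== SOURCE B (Python) =====
-- def _line_of_token(code: str, token: str, default: int = 1, start_line: int = 1) -> int: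
--     matches = [i for i, line in enumerate(code.splitlines(), start=1) if token in line]
--     start = max(start_line, 1)
--     later = [m for m in matches if m >= start]
--     if later:
--         return later[0]
--     if matches:
--         return matches[0]
--     return default
-- ===== Notes on version B (the rewrite author's own statement) =====
-- stated objective: alternative
-- what changed: Replaces A's two short-circuiting scan loops (from max(start_line,1)-1, then from the top) with one pass that collects all 1-based matching line numbers and then selects the first one >= max(start_line,1), else the first match, else default.
import Mathlib
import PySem

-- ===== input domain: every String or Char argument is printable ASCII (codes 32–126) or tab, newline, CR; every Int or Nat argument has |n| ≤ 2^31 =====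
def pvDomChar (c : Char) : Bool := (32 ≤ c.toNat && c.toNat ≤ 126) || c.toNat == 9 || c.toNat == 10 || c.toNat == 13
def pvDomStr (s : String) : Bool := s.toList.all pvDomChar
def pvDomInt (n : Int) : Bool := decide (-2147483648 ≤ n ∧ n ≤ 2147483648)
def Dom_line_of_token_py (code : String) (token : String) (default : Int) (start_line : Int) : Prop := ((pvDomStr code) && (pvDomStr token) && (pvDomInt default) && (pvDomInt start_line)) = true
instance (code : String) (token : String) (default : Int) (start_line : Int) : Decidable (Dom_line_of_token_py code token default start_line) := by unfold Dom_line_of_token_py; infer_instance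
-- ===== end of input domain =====

-- B replaces A's two short-circuiting scans with one pass collecting all matching
-- 1-based line numbers plus an arithmetic selection; same behaviour, same cost.

-- ===== PORT A =====
-- first loop: for idx in range(max(start_line,1)-1, len(lines)): if token in lines[idx]: return idx+1
def pvScanRange (lines : List String) (token : String) : List Int → Option Int
  | [] => none
  | i :: rest =>
    if PySem.Str.isIn token (PySem.List.pyGetD lines i "") then some (i + 1)
    else pvScanRange lines token rest

-- second loop: for idx, line in enumerate(lines, start=1): if token in line: return idx
def pvScanEnum (token : String) : List (Int × String) → Option Int
  | [] => none
  | (i, l) :: rest => if PySem.Str.isIn token l then some i else pvScanEnum token rest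

def line_of_token_py (code : String) (token : String) (default : Int) (start_line : Int) : Int :=
  match pvScanRange (PySem.Str.splitlines code) token
      (PySem.List.pyRange (max start_line 1 - 1) (PySem.Str.splitlines code).length 1) with
  | some r => r
  | none =>
    match pvScanEnum token (PySem.List.enumerate (PySem.Str.splitlines code) 1) with
    | some r => r
    | none => default

-- ===== PORT B =====
def line_of_token_py_alt (code : String) (token : String) (default : Int) (start_line : Int) : Int :=
  match (((PySem.List.enumerate (PySem.Str.splitlines code) 1).filter
      (fun p => PySem.Str.isIn token p.2)).map (·.1)).filter
      (fun m => decide (max start_line 1 ≤ m)) with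
  | m :: _ => m
  | [] =>
    match ((PySem.List.enumerate (PySem.Str.splitlines code) 1).filter
        (fun p => PySem.Str.isIn token p.2)).map (·.1) with
    | m :: _ => m
    | [] => default

-- ===== PRECONDITION & SPEC =====
def Spec_line_of_token_py (code : String) (token : String) (default : Int) (start_line : Int) (out : Int) : Prop := out = line_of_token_py_alt code token default start_line
instance (code : String) (token : String) (default : Int) (start_line : Int) (out : Int) : Decidable (Spec_line_of_token_py code token default start_line out) := by unfold Spec_line_of_token_py; infer_instance

-- ===== CLAIM (what is proved, stated in full; the proofs are below) =====
def Claim_equal_line_of_token_py : Prop := ∀ (code : String) (token : String) (default : Int) (start_line : Int), Dom_line_of_token_py code token default start_line → Spec_line_of_token_py code token default start_line (line_of_token_py code token default start_line)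

-- ===== LEMMAS AND PROOFS =====

-- the fallback loop of A is the head of B's match list
theorem pvScanEnum_eq_head (token : String) (lines : List String) (s : Int) :
    pvScanEnum token (PySem.List.enumerate lines s)
      = (((PySem.List.enumerate lines s).filter (fun p => PySem.Str.isIn token p.2)).map (·.1)).head? := by
  induction lines generalizing s with
  | nil => simp [PySem.List.enumerate_nil, pvScanEnum]
  | cons x xs ih =>
    rw [PySem.List.enumerate_cons]
    by_cases h : PySem.Chars.isIn token.toList x.toList = true
    · simp [pvScanEnum, h]
    · simp only [Bool.not_eq_true] at h
      simp [pvScanEnum, h, ih]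

-- every index produced by enumerate (lines, s) is ≥ s
theorem pvMem_matches_ge (token : String) (lines : List String) (s : Int) (m : Int)
    (hm : m ∈ ((PySem.List.enumerate lines s).filter (fun p => PySem.Str.isIn token p.2)).map (·.1)) :
    s ≤ m := by
  simp only [List.mem_map, List.mem_filter] at hm
  obtain ⟨p, ⟨hp, _⟩, rfl⟩ := hm
  rw [PySem.List.mem_enumerate_iff] at hp
  obtain ⟨k, hk, rfl⟩ := hp
  simp

-- dropping the first k lines = filtering B's match list at threshold s + k
theorem pvFilter_matches_drop (token : String) (lines : List String) (k : Nat) (s : Int) :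
    (((PySem.List.enumerate lines s).filter (fun p => PySem.Str.isIn token p.2)).map (·.1)).filter
        (fun m => decide (s + (k : Int) ≤ m))
      = ((PySem.List.enumerate (lines.drop k) (s + (k : Int))).filter
          (fun p => PySem.Str.isIn token p.2)).map (·.1) := by
  induction lines generalizing k s with
  | nil => simp [PySem.List.enumerate_nil]
  | cons x xs ih =>
    cases k with
    | zero =>
      simp only [Nat.cast_zero, add_zero, List.drop_zero]
      rw [List.filter_eq_self.2]
      intro m hm
      exact decide_eq_true (pvMem_matches_ge token (x :: xs) s m hm)
    | succ k =>
      rw [PySem.List.enumerate_cons]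
      have hdrop : (x :: xs).drop (k + 1) = xs.drop k := rfl
      rw [hdrop]
      have harith : s + ((k : Int) + 1) = (s + 1) + (k : Int) := by ring
      by_cases h : PySem.Chars.isIn token.toList x.toList = true
      · have hlt : ¬ ((s + 1) + (k : Int) ≤ s) := by omega
        simp [h, Nat.cast_succ, harith, hlt]
        simpa using ih k (s + 1)
      · simp only [Bool.not_eq_true] at h
        simp [h, Nat.cast_succ, harith]
        simpa using ih k (s + 1)

-- A's main loop over range(a, len(lines)) = head of the matches of the dropped suffix
theorem pvScanRange_eq (lines : List String) (token : String) (a : Int) (ha : 0 ≤ a) :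
    pvScanRange lines token (PySem.List.pyRange a lines.length 1)
      = (((PySem.List.enumerate (lines.drop a.toNat) (a + 1)).filter
          (fun p => PySem.Str.isIn token p.2)).map (·.1)).head? := by
  by_cases hlt : a < (lines.length : Int)
  · have hstep : ∀ (n : Nat), ∀ a : Int, 0 ≤ a → (lines.length : Int) - a ≤ (n : Int) →
        pvScanRange lines token (PySem.List.pyRange a lines.length 1)
          = (((PySem.List.enumerate (lines.drop a.toNat) (a + 1)).filter
              (fun p => PySem.Str.isIn token p.2)).map (·.1)).head? := by
      intro n
      induction n with
      | zero =>
        intro a ha hn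
        have hge : (lines.length : Int) ≤ a := by omega
        rw [PySem.List.pyRange_one_eq_nil hge]
        have : lines.length ≤ a.toNat := by omega
        simp [pvScanRange, List.drop_eq_nil_of_le this, PySem.List.enumerate_nil]
      | succ n ih =>
        intro a ha hn
        by_cases h : a < (lines.length : Int)
        · rw [PySem.List.pyRange_one_cons h]
          have hlen : a.toNat < lines.length := by omega
          have hdrop : lines.drop a.toNat = lines[a.toNat] :: lines.drop (a.toNat + 1) :=
            (List.drop_eq_getElem_cons hlen)
          have hget : PySem.List.pyGetD lines a "" = lines[a.toNat] :=
            PySem.List.pyGetD_eq_getElem lines "" ha (by exact_mod_cast h)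
          rw [hdrop, PySem.List.enumerate_cons]
          by_cases hp : PySem.Chars.isIn token.toList lines[a.toNat].toList = true
          · simp [pvScanRange, hget, hp]
          · simp only [Bool.not_eq_true] at hp
            have ih' := ih (a + 1) (by omega) (by omega)
            have ht : (a + 1).toNat = a.toNat + 1 := by omega
            rw [ht] at ih'
            simp [pvScanRange, hget, hp, ih', add_assoc]
        · have hge : (lines.length : Int) ≤ a := by omega
          rw [PySem.List.pyRange_one_eq_nil hge]
          have : lines.length ≤ a.toNat := by omega
          simp [pvScanRange, List.drop_eq_nil_of_le this, PySem.List.enumerate_nil]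
    exact hstep (lines.length) a ha (by omega)
  · have hge : (lines.length : Int) ≤ a := by omega
    rw [PySem.List.pyRange_one_eq_nil hge]
    have : lines.length ≤ a.toNat := by omega
    simp [pvScanRange, List.drop_eq_nil_of_le this, PySem.List.enumerate_nil]

-- ===== VERDICT (by name: the statement is the Claim_ definition above) =====
theorem line_of_token_py_spec : Claim_equal_line_of_token_py := by
  intro code token default start_line _
  unfold Spec_line_of_token_py line_of_token_py line_of_token_py_alt
  set lines := PySem.Str.splitlines code with hlines
  set st := max start_line 1 with hst
  have hst1 : 1 ≤ st := le_max_right _ _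
  have hk : ((st - 1).toNat : Int) = st - 1 := by omega
  have hfd := pvFilter_matches_drop token lines ((st - 1).toNat) 1
  rw [hk, show (1 : Int) + (st - 1) = st by ring] at hfd
  have hmain :
      pvScanRange lines token (PySem.List.pyRange (st - 1) lines.length 1)
        = ((((PySem.List.enumerate lines 1).filter (fun p => PySem.Str.isIn token p.2)).map (·.1)).filter
            (fun m => decide (st ≤ m))).head? := by
    rw [pvScanRange_eq lines token (st - 1) (by omega),
        show st - 1 + 1 = st by ring, hfd]
  rw [hmain, pvScanEnum_eq_head]
  cases hcase : ((((PySem.List.enumerate lines 1).filter (fun p => PySem.Str.isIn token p.2)).map (·.1)).filter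
          (fun m => decide (st ≤ m))) with
  | nil =>
    simp only [List.head?_nil]
    cases hms : (((PySem.List.enumerate lines 1).filter (fun p => PySem.Str.isIn token p.2)).map (·.1)) with
    | nil => simp
    | cons m ms => simp
  | cons m ms => simp
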